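-- pv_equiv track=rewrite | github.com/ufosc/swampymud | swampymud/util/english.py | english_list_no_article
-- ===== SOURCE A (Python) =====
-- def english_list_no_article(phrase_list, oxford_comma=True):
--     ''' Formats a list of strings correctly into an english
--     gramatically correct list of phrases, with commas if the list
--     has 3 or more elements. Uses the oxford comma by default.
--     0 elements:
--         phrase_list = []
--         returns "" (empty string)
--     1 element:
--         phrase_list = ["dog"]
--         returns "dog"
--         This does than extract the string from the list, but is included for completion
--     2 elements:
--         phrase_list = ["dog", "cat"]
--         returns "dog and cat"
--     3 elements:
--         if oxford_comma:
--             phrase_list = ["dog", "cat", "fish"]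
--             returns "dog, cat, and fish"
--         if not oxford_comma:
--             phrase_list = ["dog", "cat", "fish"]
--             returns "dog, cat and fish"
--     '''
--     if not phrase_list:
--         return ""
--     for phrase in phrase_list:
--         if type(phrase) is not str:
--             raise TypeError("All elements in phrase_list must be of type str")
--     if len(phrase_list) == 1:
--         return phrase_list[0]
--     elif len(phrase_list) == 2:
--         return " and ".join(phrase_list)
--     else:
--         output = []
--         if oxford_comma:
--             output.append(", ".join(phrase_list[:-1]))
--             output.append(", and " + phrase_list[-1])
--             return "".join(output)
--         else:
--             output.append(", ".join(phrase_list[:-2]))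
--             output.append(", " + " and ".join(phrase_list[-2:]))
--             return "".join(output)
-- ===== SOURCE B (Python) =====
-- def english_list_no_article(phrase_list, oxford_comma=True):
--     if not phrase_list:
--         return ""
--     for phrase in phrase_list:
--         if type(phrase) is not str:
--             raise TypeError("All elements in phrase_list must be of type str")
--     if len(phrase_list) == 1:
--         return phrase_list[0]
--
--     def rec(xs, pair_sep):
--         # build the sentence left-to-right by structural recursion; xs has >= 2 elements
--         if len(xs) == 2:
--             return xs[0] + pair_sep + xs[1]
--         return xs[0] + ", " + rec(xs[1:], pair_sep)
--
--     pair_sep = " and " if len(phrase_list) == 2 or not oxford_comma else ", and "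
--     return rec(phrase_list, pair_sep)
-- ===== Notes on version B (the rewrite author's own statement) =====
-- stated objective: alternative
-- what changed: Replaces A's staged slice-and-join construction (building pieces with str.join over phrase_list[:-1]/[-2:]) by a structural recursion that emits one phrase plus one separator per step, carrying only the final pair separator as a parameter.
import Mathlib
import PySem

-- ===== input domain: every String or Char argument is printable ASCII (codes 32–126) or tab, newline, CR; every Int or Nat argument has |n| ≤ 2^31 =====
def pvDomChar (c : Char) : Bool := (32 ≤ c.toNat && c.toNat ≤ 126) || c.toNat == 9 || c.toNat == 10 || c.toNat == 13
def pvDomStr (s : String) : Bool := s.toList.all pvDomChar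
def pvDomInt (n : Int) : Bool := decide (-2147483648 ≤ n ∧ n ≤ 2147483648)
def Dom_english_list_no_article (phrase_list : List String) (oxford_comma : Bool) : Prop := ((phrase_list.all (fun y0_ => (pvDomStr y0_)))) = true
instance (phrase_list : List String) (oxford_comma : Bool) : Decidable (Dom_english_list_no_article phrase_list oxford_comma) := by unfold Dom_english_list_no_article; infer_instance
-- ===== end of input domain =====

-- B replaces A's staged slice-and-join construction by a left-to-right structural recursion that
-- emits one phrase and one separator per step (alternative decomposition, same cost).
-- In Lean every element is a String, so A's TypeError loop can never fire and both ports are total.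

-- ===== PORT A =====
def english_list_no_article (phrase_list : List String) (oxford_comma : Bool) : String :=
  if phrase_list = [] then ""
  else if phrase_list.length = 1 then (PySem.List.pyGet? phrase_list 0).getD ""
  else if phrase_list.length = 2 then PySem.Str.join " and " phrase_list
  else if oxford_comma then
    -- output = [", ".join(phrase_list[:-1]), ", and " + phrase_list[-1]]; return "".join(output)
    PySem.Str.join "" [PySem.Str.join ", " (PySem.List.slice phrase_list none (some (-1))),
                       ", and " ++ (PySem.List.pyGet? phrase_list (-1)).getD ""]
  else
    PySem.Str.join "" [PySem.Str.join ", " (PySem.List.slice phrase_list none (some (-2))),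
                       ", " ++ PySem.Str.join " and " (PySem.List.slice phrase_list (some (-2)) none)]

-- ===== PORT B =====
-- rec(xs, pair_sep): every call site passes xs with >= 2 elements; the [] and [x]
-- patterns are unreachable (in Python they would index out of range) and return dummies.
def elnaRec (pair_sep : String) : List String → String
  | [] => ""
  | [x] => x
  | [x, y] => x ++ pair_sep ++ y
  | x :: xs => x ++ ", " ++ elnaRec pair_sep xs

def english_list_no_article_alt (phrase_list : List String) (oxford_comma : Bool) : String :=
  match phrase_list with
  | [] => ""
  | [x] => x
  | xs =>
    let pair_sep : String := if xs.length = 2 || !oxford_comma then " and " else ", and "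
    elnaRec pair_sep xs

-- ===== PRECONDITION & SPEC =====
def Spec_english_list_no_article (phrase_list : List String) (oxford_comma : Bool) (out : String) : Prop := out = english_list_no_article_alt phrase_list oxford_comma
instance (phrase_list : List String) (oxford_comma : Bool) (out : String) : Decidable (Spec_english_list_no_article phrase_list oxford_comma out) := by unfold Spec_english_list_no_article; infer_instance

-- ===== CLAIM (what is proved, stated in full; the proofs are below) =====
def Claim_equal_english_list_no_article : Prop := ∀ (phrase_list : List String) (oxford_comma : Bool), Dom_english_list_no_article phrase_list oxford_comma → Spec_english_list_no_article phrase_list oxford_comma (english_list_no_article phrase_list oxford_comma)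

-- ===== LEMMAS AND PROOFS =====

-- appending one more chunk to a nonempty join inserts one more separator (List Char level)
lemma chars_join_append_singleton (sep a : List Char) (L : List (List Char)) (h : L ≠ []) :
    PySem.Chars.join sep (L ++ [a]) = PySem.Chars.join sep L ++ sep ++ a := by
  induction L with
  | nil => exact absurd rfl h
  | cons x t ih =>
    cases t with
    | nil => simp [PySem.Chars.join_cons_cons, PySem.Chars.join_singleton]
    | cons y t' =>
      simp only [List.cons_append, PySem.Chars.join_cons_cons]
      rw [← List.cons_append, ih (by simp)]
      simp

-- String-level version
lemma join_append_singleton (sep a : String) (l : List String) (h : l ≠ []) :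
    PySem.Str.join sep (l ++ [a]) = PySem.Str.join sep l ++ sep ++ a := by
  apply String.toList_inj.mp
  simp only [PySem.Str.toList_join, String.toList_append, List.map_append, List.map_cons,
    List.map_nil]
  exact chars_join_append_singleton sep.toList a.toList _ (by simpa using h)

lemma join1 (sep x : String) : PySem.Str.join sep [x] = x := by
  apply String.toList_inj.mp
  simp [PySem.Str.toList_join, PySem.Chars.join_singleton]

lemma join2 (sep x y : String) : PySem.Str.join sep [x, y] = x ++ sep ++ y := by
  apply String.toList_inj.mp
  simp [PySem.Str.toList_join, PySem.Chars.join_cons_cons, PySem.Chars.join_singleton]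

lemma join_cons_cons (sep x y : String) (t : List String) :
    PySem.Str.join sep (x :: y :: t) = x ++ sep ++ PySem.Str.join sep (y :: t) := by
  apply String.toList_inj.mp
  simp [PySem.Str.toList_join, PySem.Chars.join_cons_cons]

-- characterization of the recursive builder on a list split as prefix ++ [a, b]
lemma elnaRec_eq (pair_sep : String) (l : List String) (a b : String) :
    elnaRec pair_sep (l ++ [a, b]) = PySem.Str.join ", " (l ++ [a]) ++ pair_sep ++ b := by
  induction l with
  | nil => simp [elnaRec, join1]
  | cons x t ih =>
    obtain ⟨c, cs, hc⟩ : ∃ c cs, t ++ [a] = c :: cs := by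
      cases t with
      | nil => exact ⟨a, [], rfl⟩
      | cons u t' => exact ⟨u, t' ++ [a], rfl⟩
    have hab : t ++ [a, b] = c :: (cs ++ [b]) := by
      rw [show t ++ [a, b] = (t ++ [a]) ++ [b] by simp, hc]; rfl
    obtain ⟨z, rest, hz⟩ : ∃ z rest, cs ++ [b] = z :: rest := by
      cases cs with
      | nil => exact ⟨b, [], rfl⟩
      | cons u t' => exact ⟨u, t' ++ [b], rfl⟩
    have hstep : elnaRec pair_sep (x :: t ++ [a, b]) =
        x ++ ", " ++ elnaRec pair_sep (t ++ [a, b]) := by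
      rw [List.cons_append, hab, hz]; rfl
    rw [hstep, ih, List.cons_append, hc, join_cons_cons]
    simp [String.append_assoc]

-- every list with ≥ 3 elements splits as (nonempty prefix) ++ [a, b]
lemma split_last_two {α : Type} (x y z : α) (rest : List α) :
    ∃ (l : List α) (a b : α), l ≠ [] ∧ x :: y :: z :: rest = l ++ [a, b] := by
  induction rest generalizing x y z with
  | nil => exact ⟨[x], y, z, by simp, rfl⟩
  | cons w t ih =>
    obtain ⟨l, a, b, hl, he⟩ := ih y z w
    exact ⟨x :: l, a, b, by simp, by rw [List.cons_append, ← he]⟩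

lemma alt_cons_cons (x y : String) (rest : List String) (oxford_comma : Bool) :
    english_list_no_article_alt (x :: y :: rest) oxford_comma =
      elnaRec (if (x :: y :: rest).length = 2 || !oxford_comma then " and " else ", and ")
        (x :: y :: rest) := rfl

theorem english_list_no_article_spec : Claim_equal_english_list_no_article := by
  intro phrase_list oxford_comma _
  unfold Spec_english_list_no_article english_list_no_article
  match phrase_list with
  | [] => rfl
  | [x] => rfl
  | [x, y] =>
    rw [alt_cons_cons]
    simp [elnaRec, join2]
  | x :: y :: z :: rest =>
    obtain ⟨l, a, b, hl, he⟩ := split_last_two x y z rest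
    rw [alt_cons_cons, he]
    have hlen : (l ++ [a, b]).length = l.length + 2 := by simp
    have hne2 : ¬ (l ++ [a, b]).length = 2 := by
      cases l with
      | nil => exact absurd rfl hl
      | cons p q => simp
    have hne1 : ¬ (l ++ [a, b]).length = 1 := by simp [hlen]
    have hnil : ¬ (l ++ [a, b]) = ([] : List String) := by simp
    have hslice2 : PySem.List.slice (l ++ [a, b]) none (some (-2)) = l := by
      rw [PySem.List.slice_to_neg_ofNat (l ++ [a, b]) 2 (by omega)]
      simp [hlen]
    have hslice2' : PySem.List.slice (l ++ [a, b]) (some (-2)) none = [a, b] := by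
      rw [PySem.List.slice_from_neg_ofNat (l ++ [a, b]) 2 (by omega)]
      simp [hlen]
    have hdl : (l ++ [a, b]).dropLast = l ++ [a] := by
      rw [show l ++ [a, b] = (l ++ [a]) ++ [b] by simp]
      simp
    have hlast : PySem.List.pyGet? (l ++ [a, b]) (-1) = some b := by
      rw [show l ++ [a, b] = (l ++ [a]) ++ [b] by simp]
      exact PySem.List.pyGet?_neg_one_append_singleton _ _
    simp only [if_neg hnil, if_neg hne1, Bool.or_eq_true, decide_eq_true_eq,
      hne2, false_or]
    cases oxford_comma with
    | true =>
      simp only [Bool.not_true, Bool.false_eq_true, if_false, if_true,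
        PySem.List.slice_to_neg_one, hdl, hlast, Option.getD_some, elnaRec_eq, join2]
      apply String.toList_inj.mp
      simp [PySem.Str.toList_join]
    | false =>
      simp only [Bool.not_false, if_true, Bool.false_eq_true, if_false,
        hslice2, hslice2', hlast, elnaRec_eq, join2,
        join_append_singleton ", " a l hl]
      apply String.toList_inj.mp
      simp [PySem.Str.toList_join]
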